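-- pv_equiv track=rewrite | github.com/EladAssia/InterviewBit | Greedy Algorithm/Seats.py | seats
-- ===== SOURCE A (Python) =====
-- def seats(A):
--     MOD = 10000003
--     lst = [ii for ii in range(len(A)) if A[ii] == 'x']
--     if len(lst) < 1:
--         return 0
--     min_lst = min(lst)
--     max_lst = max(lst)
--     d = {}
--     for ii in lst:
--         d[ii] = 1
--     if len(lst)%2 == 0:
--         m = lst[len(lst)//2]
--         l_av = m - 1
--         r_av = m + 1
--         while l_av in d:
--             l_av -= 1
--         while r_av in d:
--             r_av += 1
--         left, right = 0, 0
--         for ii in range(m-1, min_lst-1, -1):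
--             if ii in d and ii < l_av:
--                 left = left + (l_av - ii)
--                 l_av -= 1
--         for ii in range(m+1, max_lst+1):
--             if ii in d and ii > r_av:
--                 right = right + (ii - r_av)
--                 r_av += 1
--         tot = left + right
--         m = lst[len(lst)//2 - 1]
--         l_av = m - 1
--         r_av = m + 1
--         while l_av in d:
--             l_av -= 1
--         while r_av in d:
--             r_av += 1
--         left, right = 0, 0
--         for ii in range(m-1, min_lst-1, -1):
--             if ii in d and ii < l_av:
--                 left = left + (l_av - ii)
--                 l_av -= 1
--         for ii in range(m+1, max_lst+1):
--             if ii in d and ii > r_av: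
--                 right = right + (ii - r_av)
--                 r_av += 1
--         tot = min(tot, left + right)
--     else:
--         m = lst[len(lst)//2]
--         l_av = m - 1
--         r_av = m + 1
--         while l_av in d:
--             l_av -= 1
--         while r_av in d:
--             r_av += 1
--         left, right = 0, 0
--         for ii in range(m-1, min_lst-1, -1):
--             if ii in d and ii < l_av:
--                 left = left + (l_av - ii)
--                 l_av -= 1
--         for ii in range(m+1, max_lst+1):
--             if ii in d and ii > r_av:
--                 right = right + (ii - r_av)
--                 r_av += 1
--         tot = left + right
--     return tot%MOD
-- ===== SOURCE B (Python) =====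
-- def seats(A):
--     MOD = 10000003
--     pos = [i for i, c in enumerate(A) if c == 'x']
--     if not pos:
--         return 0
--     b = [p - r for r, p in enumerate(pos)]
--     med = b[len(b) // 2]
--     return sum(abs(v - med) for v in b) % MOD
-- ===== Notes on version B (the rewrite author's own statement) =====
-- stated objective: simpler
-- what changed: Replaces the dict-based outward span-scan with dual-median even-case handling by the classic reduction: occupied-seat positions normalized to pos[i]-i, one median taken, sum of absolute deviations returned mod 10000003.
import Mathlib
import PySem

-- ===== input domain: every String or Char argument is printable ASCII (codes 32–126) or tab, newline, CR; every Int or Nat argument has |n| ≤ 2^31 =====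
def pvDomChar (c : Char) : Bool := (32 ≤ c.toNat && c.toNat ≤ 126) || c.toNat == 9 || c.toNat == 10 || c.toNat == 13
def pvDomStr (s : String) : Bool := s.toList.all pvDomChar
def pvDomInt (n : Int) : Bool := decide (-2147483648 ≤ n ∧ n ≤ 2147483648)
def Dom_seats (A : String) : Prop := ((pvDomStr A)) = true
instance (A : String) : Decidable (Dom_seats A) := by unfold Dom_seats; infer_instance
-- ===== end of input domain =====

-- B replaces A's triple outward span-scan over a dict by the median-of-(pos[i]-i) sum of
-- absolute deviations: simpler, one pass over the occupied positions.

-- ===== PORT A =====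
-- step of 'for ii in range(m-1, min_lst-1, -1): if ii in d and ii < l_av: ...', state (l_av, left)
def seatsStepDown (d : PySem.Dict Int Int) (st : Int × Int) (ii : Int) : Int × Int :=
  if (PySem.Dict.get? d ii).isSome ∧ ii < st.1 then (st.1 - 1, st.2 + (st.1 - ii)) else st

-- step of 'for ii in range(m+1, max_lst+1): if ii in d and ii > r_av: ...', state (r_av, right)
def seatsStepUp (d : PySem.Dict Int Int) (st : Int × Int) (ii : Int) : Int × Int :=
  if (PySem.Dict.get? d ii).isSome ∧ ii > st.1 then (st.1 + 1, st.2 + (ii - st.1)) else st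

-- 'while l_av in d: l_av -= 1' as fuel recursion; |d|+1 fuel always suffices (the loop only
-- steps while the current cell is a key, and the visited cells are distinct)
def seatsWhileDown (d : PySem.Dict Int Int) : Nat → Int → Int
  | 0, l => l
  | fuel+1, l => if (PySem.Dict.get? d l).isSome then seatsWhileDown d fuel (l - 1) else l

-- 'while r_av in d: r_av += 1'
def seatsWhileUp (d : PySem.Dict Int Int) : Nat → Int → Int
  | 0, r => r
  | fuel+1, r => if (PySem.Dict.get? d r).isSome then seatsWhileUp d fuel (r + 1) else r

-- A's thrice-repeated block (l_av/r_av search, the two for-loops, left+right) for centre m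
def seatsTot (d : PySem.Dict Int Int) (fuel : Nat) (minL maxL m : Int) : Int :=
  let lav := seatsWhileDown d fuel (m - 1)
  let rav := seatsWhileUp d fuel (m + 1)
  let left := ((PySem.List.pyRange (m-1) (minL-1) (-1)).foldl (seatsStepDown d) (lav, 0)).2
  let right := ((PySem.List.pyRange (m+1) (maxL+1) 1).foldl (seatsStepUp d) (rav, 0)).2
  left + right

def seats (A : String) : Int :=
  let lst := (PySem.List.pyRange 0 (PySem.Str.len A) 1).filter
      (fun ii => PySem.Str.pyGet? A ii == some 'x')
  if lst.length < 1 then 0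
  else
    -- indices below are always in range (lst ≠ []), so .getD 0 never takes its default
    let minL := (PySem.List.min? lst (fun x => x)).getD 0
    let maxL := (PySem.List.max? lst (fun x => x)).getD 0
    let d := lst.foldl (fun d ii => PySem.Dict.insert d ii 1) (PySem.Dict.empty)
    let fuel := lst.length + 1
    if PySem.Int.mod (lst.length : Int) 2 = 0 then
      let tot := seatsTot d fuel minL maxL
        ((PySem.List.pyGet? lst (PySem.Int.floordiv (lst.length : Int) 2)).getD 0)
      let tot2 := seatsTot d fuel minL maxL
        ((PySem.List.pyGet? lst (PySem.Int.floordiv (lst.length : Int) 2 - 1)).getD 0)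
      PySem.Int.mod (min tot tot2) 10000003
    else
      PySem.Int.mod (seatsTot d fuel minL maxL
        ((PySem.List.pyGet? lst (PySem.Int.floordiv (lst.length : Int) 2)).getD 0)) 10000003

-- ===== PORT B =====
def seats_alt (A : String) : Int :=
  let pos := ((PySem.List.enumerate A.toList 0).filter (fun pc => pc.2 == 'x')).map (fun pc => pc.1)
  if pos = [] then 0
  else
    let b := (PySem.List.enumerate pos 0).map (fun rp => rp.2 - rp.1)
    let med := (PySem.List.pyGet? b (PySem.Int.floordiv (b.length : Int) 2)).getD 0
    PySem.Int.mod ((b.map (fun x => |x - med|)).sum) 10000003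

-- ===== PRECONDITION & SPEC =====
def Spec_seats (A : String) (out : Int) : Prop := out = seats_alt A
instance (A : String) (out : Int) : Decidable (Spec_seats A out) := by unfold Spec_seats; infer_instance

-- ===== CLAIM (what is proved, stated in full; the proofs are below) =====
def Claim_equal_seats : Prop := ∀ (A : String), Dom_seats A → Spec_seats A (seats A)


-- proof-side models of A's loop bodies (the dict membership test removed)
def pStepDown (st : Int × Int) (ii : Int) : Int × Int :=
  if ii < st.1 then (st.1 - 1, st.2 + (st.1 - ii)) else st

def pStepUp (st : Int × Int) (ii : Int) : Int × Int :=
  if ii > st.1 then (st.1 + 1, st.2 + (ii - st.1)) else st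

-- cost of packing a descending list of positions into consecutive slots v, v-1, …
def packDown : List Int → Int → Int
  | [], _ => 0
  | p :: r, v => (v - p) + packDown r (v - 1)

-- cost of packing an ascending list of positions into consecutive slots v, v+1, …
def packUpL : List Int → Int → Int
  | [], _ => 0
  | q :: r, v => (q - v) + packUpL r (v + 1)

-- packDown on a reversed ascending list, recursing on the ascending list
def packDownAsc : List Int → Int → Int
  | [], _ => 0
  | x :: t, v => (v - (t.length : Int) - x) + packDownAsc t v

theorem dict_get_mem_aux (lst : List Int) (x : Int) : ∀ (d : PySem.Dict Int Int),
    ((lst.foldl (fun d ii => PySem.Dict.insert d ii 1) d).get? x).isSome = true ↔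
      x ∈ lst ∨ (d.get? x).isSome = true := by
  induction lst with
  | nil => intro d; simp
  | cons a l ih =>
    intro d
    rw [List.foldl_cons, ih]
    by_cases hx : x = a
    · subst hx; simp [PySem.Dict.get?_insert_self]
    · simp [PySem.Dict.get?_insert_of_ne d 1 hx, hx]

theorem dict_get_mem (lst : List Int) (x : Int) :
    ((lst.foldl (fun d ii => PySem.Dict.insert d ii 1)
        (PySem.Dict.empty : PySem.Dict Int Int)).get? x).isSome = true ↔ x ∈ lst := by
  simpa [pysem] using dict_get_mem_aux lst x PySem.Dict.empty

theorem whileDown_le (d : PySem.Dict Int Int) : ∀ (fuel : Nat) (v : Int),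
    seatsWhileDown d fuel v ≤ v := by
  intro fuel
  induction fuel with
  | zero => intro v; simp [seatsWhileDown]
  | succ f ih =>
    intro v
    rw [seatsWhileDown]
    split
    · exact le_trans (ih (v - 1)) (by omega)
    · exact le_rfl

theorem whileUp_ge (d : PySem.Dict Int Int) : ∀ (fuel : Nat) (v : Int),
    v ≤ seatsWhileUp d fuel v := by
  intro fuel
  induction fuel with
  | zero => intro v; simp [seatsWhileUp]
  | succ f ih =>
    intro v
    rw [seatsWhileUp]
    split
    · exact le_trans (by omega) (ih (v + 1))
    · exact le_rfl

theorem foldl_filter_of_id {α β : Type} (f : β → α → β) (p : α → Bool) (l : List α) :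
    ∀ (init : β), (∀ st x, x ∈ l → p x = false → f st x = st) →
    l.foldl f init = (l.filter p).foldl f init := by
  induction l with
  | nil => intro init _; rfl
  | cons a t ih =>
    intro init h
    rw [List.foldl_cons, List.filter_cons]
    by_cases hp : p a = true
    · rw [if_pos hp, List.foldl_cons]
      exact ih _ (fun st x hx => h st x (List.mem_cons_of_mem a hx))
    · rw [if_neg hp, h init a (List.mem_cons_self) (Bool.eq_false_iff.mpr hp)]
      exact ih _ (fun st x hx => h st x (List.mem_cons_of_mem a hx))

theorem packN_down (P : List Int) : ∀ (l c : Int), P.Pairwise (· > ·) →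
    (∀ p ∈ P, p < l) →
    P.foldl pStepDown (l, c) = (l - P.length, c + packDown P l) := by
  induction P with
  | nil => intro l c _ _; simp [packDown]
  | cons p r ih =>
    intro l c hpw hlt
    have hp : p < l := hlt p List.mem_cons_self
    have hstep : pStepDown (l, c) p = (l - 1, c + (l - p)) := by
      unfold pStepDown; rw [if_pos hp]
    rw [List.foldl_cons, hstep,
      ih (l - 1) (c + (l - p)) hpw.tail
        (fun q hq => by have := (List.pairwise_cons.mp hpw).1 q hq; omega)]
    refine Prod.ext ?_ ?_
    · simp; ring
    · simp only [packDown]; ring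

theorem packN_up (P : List Int) : ∀ (l c : Int), P.Pairwise (· < ·) →
    (∀ p ∈ P, l < p) →
    P.foldl pStepUp (l, c) = (l + P.length, c + packUpL P l) := by
  induction P with
  | nil => intro l c _ _; simp [packUpL]
  | cons p r ih =>
    intro l c hpw hlt
    have hp : l < p := hlt p List.mem_cons_self
    have hstep : pStepUp (l, c) p = (l + 1, c + (p - l)) := by
      unfold pStepUp; rw [if_pos hp]
    rw [List.foldl_cons, hstep,
      ih (l + 1) (c + (p - l)) hpw.tail
        (fun q hq => by have := (List.pairwise_cons.mp hpw).1 q hq; omega)]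
    refine Prod.ext ?_ ?_
    · simp; ring
    · simp only [packUpL]; ring

theorem scan_down (P : List Int) : ∀ (v : Int) (fuel : Nat) (d : PySem.Dict Int Int),
    P.Pairwise (· > ·) → (∀ p ∈ P, p ≤ v) → P.length < fuel →
    (∀ x : Int, x ≤ v → ((PySem.Dict.get? d x).isSome = true ↔ x ∈ P)) →
    (P.foldl pStepDown (seatsWhileDown d fuel v, 0)).2 = packDown P v := by
  induction P with
  | nil => intro v fuel d _ _ _ _; simp [packDown]
  | cons p r ih =>
    intro v fuel d hpw hle hf hmem
    obtain ⟨f, rfl⟩ : ∃ f, fuel = f + 1 := ⟨fuel - 1, by omega⟩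
    by_cases hpv : p = v
    · subst hpv
      have hv : (PySem.Dict.get? d p).isSome = true :=
        (hmem p le_rfl).mpr List.mem_cons_self
      rw [seatsWhileDown, if_pos hv]
      have hlav := whileDown_le d f (p - 1)
      have hskip : pStepDown (seatsWhileDown d f (p - 1), 0) p
          = (seatsWhileDown d f (p - 1), 0) := by
        unfold pStepDown; rw [if_neg (by simp; omega)]
      rw [List.foldl_cons, hskip,
        ih (p - 1) f d hpw.tail
          (fun q hq => by have := (List.pairwise_cons.mp hpw).1 q hq; omega)
          (by simpa using Nat.lt_of_succ_lt_succ hf)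
          (fun x hx => by
            rw [hmem x (by omega)]
            simp only [List.mem_cons]
            constructor
            · rintro (rfl | h)
              · omega
              · exact h
            · exact fun h => Or.inr h)]
      simp [packDown]
    · have hpv' : p < v := lt_of_le_of_ne (hle p List.mem_cons_self) hpv
      have hvnot : ¬ (PySem.Dict.get? d v).isSome = true := by
        rw [hmem v le_rfl]
        simp only [List.mem_cons]
        rintro (rfl | h)
        · exact hpv rfl
        · have := (List.pairwise_cons.mp hpw).1 v h; omega
      rw [seatsWhileDown, if_neg hvnot,
        packN_down (p :: r) v 0 hpw
          (fun q hq => by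
            rcases List.mem_cons.mp hq with rfl | h
            · exact hpv'
            · have := (List.pairwise_cons.mp hpw).1 q h; omega)]
      simp

theorem scan_up (P : List Int) : ∀ (v : Int) (fuel : Nat) (d : PySem.Dict Int Int),
    P.Pairwise (· < ·) → (∀ p ∈ P, v ≤ p) → P.length < fuel →
    (∀ x : Int, v ≤ x → ((PySem.Dict.get? d x).isSome = true ↔ x ∈ P)) →
    (P.foldl pStepUp (seatsWhileUp d fuel v, 0)).2 = packUpL P v := by
  induction P with
  | nil => intro v fuel d _ _ _ _; simp [packUpL]
  | cons p r ih =>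
    intro v fuel d hpw hle hf hmem
    obtain ⟨f, rfl⟩ : ∃ f, fuel = f + 1 := ⟨fuel - 1, by omega⟩
    by_cases hpv : p = v
    · subst hpv
      have hv : (PySem.Dict.get? d p).isSome = true :=
        (hmem p le_rfl).mpr List.mem_cons_self
      rw [seatsWhileUp, if_pos hv]
      have hlav := whileUp_ge d f (p + 1)
      have hskip : pStepUp (seatsWhileUp d f (p + 1), 0) p
          = (seatsWhileUp d f (p + 1), 0) := by
        unfold pStepUp; rw [if_neg (by simp; omega)]
      rw [List.foldl_cons, hskip,
        ih (p + 1) f d hpw.tail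
          (fun q hq => by have := (List.pairwise_cons.mp hpw).1 q hq; omega)
          (by simpa using Nat.lt_of_succ_lt_succ hf)
          (fun x hx => by
            rw [hmem x (by omega)]
            simp only [List.mem_cons]
            constructor
            · rintro (rfl | h)
              · omega
              · exact h
            · exact fun h => Or.inr h)]
      simp [packUpL]
    · have hpv' : v < p := lt_of_le_of_ne (hle p List.mem_cons_self) (fun h => hpv h.symm)
      have hvnot : ¬ (PySem.Dict.get? d v).isSome = true := by
        rw [hmem v le_rfl]
        simp only [List.mem_cons]
        rintro (rfl | h)
        · exact hpv rfl
        · have := (List.pairwise_cons.mp hpw).1 v h; omega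
      rw [seatsWhileUp, if_neg hvnot,
        packN_up (p :: r) v 0 hpw
          (fun q hq => by
            rcases List.mem_cons.mp hq with rfl | h
            · exact hpv'
            · have := (List.pairwise_cons.mp hpw).1 q h; omega)]
      simp

theorem sum_map_getD (f : Int → Int) (l : List Int) :
    (l.map f).sum = ∑ i ∈ Finset.range l.length, f (l.getD i 0) := by
  induction l with
  | nil => simp
  | cons a t ih =>
    rw [List.map_cons, List.sum_cons, ih, List.length_cons, Finset.sum_range_succ']
    simp only [List.getD_cons_succ, List.getD_cons_zero]
    ring

theorem packDown_append (a b : List Int) : ∀ v,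
    packDown (a ++ b) v = packDown a v + packDown b (v - a.length) := by
  induction a with
  | nil => intro v; simp [packDown]
  | cons x t ih =>
    intro v
    simp only [List.cons_append, packDown, ih (v - 1), List.length_cons]
    push_cast; ring_nf

theorem packDown_reverse (P : List Int) : ∀ v, packDown P.reverse v = packDownAsc P v := by
  induction P with
  | nil => intro v; simp [packDown, packDownAsc]
  | cons x t ih =>
    intro v
    rw [List.reverse_cons, packDown_append, List.length_reverse, ih]
    simp only [packDown, packDownAsc]
    ring

theorem packDownAsc_eq_sum (T : List Int) (v : Int) :
    packDownAsc T v = ∑ i ∈ Finset.range T.length,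
      (v - ((T.length : Int) - 1 - (i : Int)) - T.getD i 0) := by
  induction T with
  | nil => simp [packDownAsc]
  | cons x t ih =>
    rw [packDownAsc, ih, List.length_cons, Finset.sum_range_succ']
    simp only [List.getD_cons_succ, List.getD_cons_zero]
    push_cast
    ring_nf

theorem packUpL_eq_sum (Q : List Int) : ∀ (v : Int),
    packUpL Q v = ∑ i ∈ Finset.range Q.length, (Q.getD i 0 - (v + (i : Int))) := by
  induction Q with
  | nil => intro v; simp [packUpL]
  | cons x t ih =>
    intro v
    rw [packUpL, ih (v + 1), List.length_cons, Finset.sum_range_succ']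
    simp only [List.getD_cons_succ, List.getD_cons_zero]
    push_cast
    ring_nf

theorem getD_gap (lst : List Int) (hs : lst.Pairwise (· < ·)) :
    ∀ (dl i : Nat), i + dl < lst.length → lst.getD i 0 + (dl : Int) ≤ lst.getD (i + dl) 0 := by
  intro dl
  induction dl with
  | zero => intro i h; simp
  | succ e ih =>
    intro i h
    have h1 := ih i (by omega)
    have h2 : lst.getD (i + e) 0 < lst.getD (i + e + 1) 0 := by
      rw [List.getD_eq_getElem _ _ (by omega), List.getD_eq_getElem _ _ (by omega)]
      exact List.pairwise_iff_getElem.mp hs _ _ (by omega) (by omega) (by omega)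
    have h3 : i + (e + 1) = i + e + 1 := by omega
    rw [h3]
    push_cast
    omega

theorem bval_mono (lst : List Int) (hs : lst.Pairwise (· < ·)) (i j : Nat)
    (hij : i ≤ j) (hj : j < lst.length) :
    lst.getD i 0 - (i : Int) ≤ lst.getD j 0 - (j : Int) := by
  have h := getD_gap lst hs (j - i) i (by omega)
  have hji : i + (j - i) = j := by omega
  rw [hji] at h
  have hc : ((j - i : Nat) : Int) = (j : Int) - (i : Int) := by push_cast [Nat.cast_sub hij]; ring
  rw [hc] at h
  omega

theorem filter_lt_take (lst : List Int) (hs : lst.Pairwise (· < ·)) (j : Nat) (hj : j < lst.length) :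
    lst.filter (fun x => decide (x < lst[j])) = lst.take j := by
  obtain ⟨m, hm⟩ : ∃ m, lst[j] = m := ⟨_, rfl⟩
  rw [hm]
  have hdecomp : lst = lst.take j ++ m :: lst.drop (j + 1) := by
    rw [← hm, ← List.drop_eq_getElem_cons hj, List.take_append_drop]
  have hall : ∀ a ∈ lst.take j, a < m := by
    intro a ha
    obtain ⟨i, hmm, rfl⟩ := List.mem_take_iff_getElem.mp ha
    rw [← hm]
    exact List.pairwise_iff_getElem.mp hs i j (by omega) hj (by omega)
  have hdrop : ∀ a ∈ lst.drop (j + 1), m < a := by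
    intro a ha
    obtain ⟨i, hmm, rfl⟩ := List.mem_iff_getElem.mp ha
    rw [List.getElem_drop, ← hm]
    exact List.pairwise_iff_getElem.mp hs j (j + 1 + i) hj (by simp at hmm; omega) (by omega)
  conv_lhs => rw [hdecomp]
  rw [List.filter_append, List.filter_cons,
    List.filter_eq_self.mpr (fun a ha => by simpa using hall a ha),
    if_neg (by simp),
    List.filter_eq_nil_iff.mpr (fun a ha => by have := hdrop a ha; simp; omega)]
  simp

theorem filter_gt_drop (lst : List Int) (hs : lst.Pairwise (· < ·)) (j : Nat) (hj : j < lst.length) :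
    lst.filter (fun x => decide (lst[j] < x)) = lst.drop (j + 1) := by
  obtain ⟨m, hm⟩ : ∃ m, lst[j] = m := ⟨_, rfl⟩
  rw [hm]
  have hdecomp : lst = lst.take j ++ m :: lst.drop (j + 1) := by
    rw [← hm, ← List.drop_eq_getElem_cons hj, List.take_append_drop]
  have hall : ∀ a ∈ lst.take j, a < m := by
    intro a ha
    obtain ⟨i, hmm, rfl⟩ := List.mem_take_iff_getElem.mp ha
    rw [← hm]
    exact List.pairwise_iff_getElem.mp hs i j (by omega) hj (by omega)
  have hdrop : ∀ a ∈ lst.drop (j + 1), m < a := by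
    intro a ha
    obtain ⟨i, hmm, rfl⟩ := List.mem_iff_getElem.mp ha
    rw [List.getElem_drop, ← hm]
    exact List.pairwise_iff_getElem.mp hs j (j + 1 + i) hj (by simp at hmm; omega) (by omega)
  conv_lhs => rw [hdecomp]
  rw [List.filter_append, List.filter_cons,
    List.filter_eq_nil_iff.mpr (fun a ha => by have := hall a ha; simp; omega),
    if_neg (by simp),
    List.filter_eq_self.mpr (fun a ha => by have := hdrop a ha; simpa using this)]
  simp

theorem filter_range_down (lst : List Int) (m minL : Int)
    (hs : lst.Pairwise (· < ·)) (hmin : ∀ x ∈ lst, minL ≤ x) :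
    (PySem.List.pyRange (m - 1) (minL - 1) (-1)).filter (fun x => decide (x ∈ lst))
      = (lst.filter (fun x => decide (x < m))).reverse := by
  have hpr : List.Pairwise (· > ·) (PySem.List.pyRange (m - 1) (minL - 1) (-1)) := by
    rw [PySem.List.pyRange_neg_one_eq_reverse]
    exact List.pairwise_reverse.mpr (PySem.List.pairwise_lt_pyRange_one _ _)
  have hnd1 : (List.filter (fun x => decide (x ∈ lst)) (PySem.List.pyRange (m - 1) (minL - 1) (-1))).Nodup :=
    List.Pairwise.filter _ (hpr.imp (fun h => by omega))
  have hnd2 : ((lst.filter (fun x => decide (x < m))).reverse).Nodup :=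
    List.nodup_reverse.mpr (List.Pairwise.filter _ (hs.imp (fun h => by omega)))
  refine List.Perm.eq_of_pairwise (le := (· > ·))
    (fun a b _ _ h1 h2 => by omega)
    (hpr.filter _)
    (List.pairwise_reverse.mpr (hs.filter _)) ?_
  rw [List.perm_ext_iff_of_nodup hnd1 hnd2]
  intro a
  simp only [List.mem_filter, List.mem_reverse, PySem.List.mem_pyRange_neg_one,
    decide_eq_true_eq]
  constructor
  · rintro ⟨⟨h1, h2⟩, h3⟩
    exact ⟨h3, by omega⟩
  · rintro ⟨h1, h2⟩
    exact ⟨⟨by have := hmin a h1; omega, by omega⟩, h1⟩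

theorem filter_range_up (lst : List Int) (m maxL : Int)
    (hs : lst.Pairwise (· < ·)) (hmax : ∀ x ∈ lst, x ≤ maxL) :
    (PySem.List.pyRange (m + 1) (maxL + 1) 1).filter (fun x => decide (x ∈ lst))
      = lst.filter (fun x => decide (m < x)) := by
  have hpr : List.Pairwise (· < ·) (PySem.List.pyRange (m + 1) (maxL + 1) 1) :=
    PySem.List.pairwise_lt_pyRange_one _ _
  have hnd1 : (List.filter (fun x => decide (x ∈ lst)) (PySem.List.pyRange (m + 1) (maxL + 1) 1)).Nodup :=
    List.Pairwise.filter _ (hpr.imp (fun h => by omega))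
  have hnd2 : (lst.filter (fun x => decide (m < x))).Nodup :=
    List.Pairwise.filter _ (hs.imp (fun h => by omega))
  refine List.Perm.eq_of_pairwise (le := (· < ·))
    (fun a b _ _ h1 h2 => by omega)
    (hpr.filter _)
    (hs.filter _) ?_
  rw [List.perm_ext_iff_of_nodup hnd1 hnd2]
  intro a
  simp only [List.mem_filter, PySem.List.mem_pyRange_one, decide_eq_true_eq]
  constructor
  · rintro ⟨⟨h1, h2⟩, h3⟩
    exact ⟨h3, by omega⟩
  · rintro ⟨h1, h2⟩
    exact ⟨⟨by omega, by have := hmax a h1; omega⟩, h1⟩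

theorem enum_map_eq (L : List Int) :
    (PySem.List.enumerate L 0).map (fun rp => rp.2 - rp.1)
      = (List.range L.length).map (fun i => L.getD i 0 - (i : Int)) := by
  apply List.ext_getElem
  · simp [PySem.List.length_enumerate]
  · intro i h1 h2
    simp only [List.getElem_map, PySem.List.getElem_enumerate, List.getElem_range]
    have hi : i < L.length := by simpa [PySem.List.length_enumerate] using h1
    rw [List.getD_eq_getElem _ _ hi]
    simp

theorem pos_eq (A : String) :
    ((PySem.List.enumerate A.toList 0).filter (fun pc => pc.2 == 'x')).map (fun pc => pc.1)
      = (PySem.List.pyRange 0 (PySem.Str.len A) 1).filter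
          (fun ii => PySem.Str.pyGet? A ii == some 'x') := by
  rw [show (PySem.List.enumerate A.toList 0) = PySem.List.enumerate A.toList from rfl,
    PySem.List.enumerate_eq_map_pyRange A.toList '?', List.filter_map, List.map_map]
  have hlen : PySem.List.len A.toList = PySem.Str.len A := by simp [pysem]
  rw [hlen]
  rw [show ((fun (pc : Int × Char) => pc.1) ∘ fun j => (j, PySem.List.pyGetD A.toList j '?'))
      = fun j => j from rfl, List.map_id']
  refine List.filter_congr (fun j hj => ?_)
  obtain ⟨hj0, hjl⟩ := PySem.List.mem_pyRange_one.mp hj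
  have hjl' : j.toNat < A.toList.length := by
    have : PySem.Str.len A = (A.toList.length : Int) := by simp [pysem]
    omega
  rw [← Int.toNat_of_nonneg hj0]
  simp only [Function.comp, PySem.List.pyGetD_natCast, PySem.Str.pyGet?_natCast,
    List.getD_eq_getElem _ _ hjl', List.getElem?_eq_getElem hjl']
  rfl

theorem abs_cost (lst : List Int) (hs : lst.Pairwise (· < ·)) (t : Nat) (ht : t < lst.length) :
    packDownAsc (lst.take t) (lst.getD t 0 - 1) + packUpL (lst.drop (t + 1)) (lst.getD t 0 + 1)
      = ∑ i ∈ Finset.range lst.length,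
          |lst.getD i 0 - (i : Int) - (lst.getD t 0 - (t : Int))| := by
  have hlt : (lst.take t).length = t := by simp; omega
  have hld : (lst.drop (t + 1)).length = lst.length - (t + 1) := by simp
  have hsplit : ∑ i ∈ Finset.range lst.length, |lst.getD i 0 - (i : Int) - (lst.getD t 0 - (t : Int))|
      = (∑ i ∈ Finset.range t, |lst.getD i 0 - (i : Int) - (lst.getD t 0 - (t : Int))|)
        + (|lst.getD t 0 - (t : Int) - (lst.getD t 0 - (t : Int))|
           + ∑ i ∈ Finset.range (lst.length - (t + 1)),
               |lst.getD (t + 1 + i) 0 - ((t + 1 + i : Nat) : Int) - (lst.getD t 0 - (t : Int))|) := by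
    rw [Finset.range_eq_Ico,
      ← Finset.sum_Ico_consecutive _ (Nat.zero_le t) (le_of_lt ht),
      Finset.sum_eq_sum_Ico_succ_bot ht, ← Finset.range_eq_Ico,
      Finset.sum_Ico_eq_sum_range]
  rw [hsplit, packDownAsc_eq_sum, packUpL_eq_sum, hlt, hld]
  have hdown : ∀ i ∈ Finset.range t,
      ((lst.getD t 0 - 1) - ((t : Int) - 1 - (i : Int)) - (lst.take t).getD i 0)
        = |lst.getD i 0 - (i : Int) - (lst.getD t 0 - (t : Int))| := by
    intro i hi
    have hi' : i < t := Finset.mem_range.mp hi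
    have hgd : (lst.take t).getD i 0 = lst.getD i 0 := by
      rw [List.getD_eq_getElem _ _ (by simp; omega), List.getD_eq_getElem _ _ (by omega)]
      exact List.getElem_take
    have hm := bval_mono lst hs i t (by omega) ht
    rw [hgd, abs_of_nonpos (by omega)]
    ring
  have hup : ∀ i ∈ Finset.range (lst.length - (t + 1)),
      ((lst.drop (t + 1)).getD i 0 - ((lst.getD t 0 + 1) + (i : Int)))
        = |lst.getD (t + 1 + i) 0 - ((t + 1 + i : Nat) : Int) - (lst.getD t 0 - (t : Int))| := by
    intro i hi
    have hi' : i < lst.length - (t + 1) := Finset.mem_range.mp hi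
    have hgd : (lst.drop (t + 1)).getD i 0 = lst.getD (t + 1 + i) 0 := by
      rw [List.getD_eq_getElem _ _ (by simp; omega), List.getD_eq_getElem _ _ (by omega)]
      exact List.getElem_drop
    have hm := bval_mono lst hs t (t + 1 + i) (by omega) (by omega)
    rw [hgd, abs_of_nonneg (by omega)]
    push_cast
    ring
  rw [Finset.sum_congr rfl hdown, Finset.sum_congr rfl hup]
  simp

theorem abs_pivot_habs (lst : List Int) (j k : Nat) (p : Nat)
    (hlo : ∀ i : Nat, i < j → lst.getD i 0 - (i : Int) ≤ lst.getD p 0 - (p : Int))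
    (hhi : ∀ i : Nat, j ≤ i → i < k → lst.getD p 0 - (p : Int) ≤ lst.getD i 0 - (i : Int))
    (hjk : j ≤ k) :
    ∑ i ∈ Finset.range k, |lst.getD i 0 - (i : Int) - (lst.getD p 0 - (p : Int))|
      = ((∑ i ∈ Finset.Ico j k, (lst.getD i 0 - (i : Int)))
          - ∑ i ∈ Finset.range j, (lst.getD i 0 - (i : Int)))
        + ((j : Int) - ((k - j : Nat) : Int)) * (lst.getD p 0 - (p : Int)) := by
  rw [Finset.range_eq_Ico, ← Finset.sum_Ico_consecutive _ (Nat.zero_le j) hjk,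
    ← Finset.range_eq_Ico]
  rw [Finset.sum_congr rfl (fun i hi =>
      abs_of_nonpos (by have := hlo i (Finset.mem_range.mp hi); omega)),
    Finset.sum_congr rfl (fun i hi =>
      abs_of_nonneg (by
        obtain ⟨h1, h2⟩ := Finset.mem_Ico.mp hi
        have := hhi i h1 h2; omega))]
  simp only [neg_sub]
  simp only [Finset.sum_sub_distrib, Finset.sum_const, Finset.card_range, Nat.card_Ico,
    nsmul_eq_mul]
  ring

theorem abs_pivot_eq (lst : List Int) (hs : lst.Pairwise (· < ·)) (j : Nat)
    (hk : lst.length = 2 * j) (hj : 1 ≤ j) :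
    ∑ i ∈ Finset.range lst.length, |lst.getD i 0 - (i : Int) - (lst.getD j 0 - (j : Int))|
      = ∑ i ∈ Finset.range lst.length,
          |lst.getD i 0 - (i : Int) - (lst.getD (j - 1) 0 - ((j - 1 : Nat) : Int))| := by
  rw [hk]
  rw [abs_pivot_habs lst j (2 * j) j
      (fun i hi => bval_mono lst hs i j (by omega) (by omega))
      (fun i h1 h2 => bval_mono lst hs j i h1 (by omega))
      (by omega),
    abs_pivot_habs lst j (2 * j) (j - 1)
      (fun i hi => bval_mono lst hs i (j - 1) (by omega) (by omega))
      (fun i h1 h2 => bval_mono lst hs (j - 1) i (by omega) (by omega))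
      (by omega)]
  have h2j : 2 * j - j = j := by omega
  rw [h2j]
  ring

theorem tot_eq (lst : List Int) (hs : lst.Pairwise (· < ·)) (t : Nat) (ht : t < lst.length) :
    seatsTot (lst.foldl (fun d ii => PySem.Dict.insert d ii 1)
        (PySem.Dict.empty : PySem.Dict Int Int))
      (lst.length + 1)
      ((PySem.List.min? lst (fun x => x)).getD 0) ((PySem.List.max? lst (fun x => x)).getD 0)
      (lst.getD t 0)
    = ∑ i ∈ Finset.range lst.length,
        |lst.getD i 0 - (i : Int) - (lst.getD t 0 - (t : Int))| := by
  have hne : lst ≠ [] := by intro h; rw [h] at ht; simp at ht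
  obtain ⟨mn, hmn⟩ : ∃ mn, PySem.List.min? lst (fun x => x) = some mn := by
    cases h : PySem.List.min? lst (fun x => x) with
    | none => exact absurd ((PySem.List.min?_eq_none_iff lst _).mp h) hne
    | some mn => exact ⟨mn, rfl⟩
  obtain ⟨mx, hmx⟩ : ∃ mx, PySem.List.max? lst (fun x => x) = some mx := by
    cases h : PySem.List.max? lst (fun x => x) with
    | none => exact absurd ((PySem.List.max?_eq_none_iff lst _).mp h) hne
    | some mx => exact ⟨mx, rfl⟩
  have hmin : ∀ x ∈ lst, mn ≤ x := fun x hx => PySem.List.min?_isMin hmn x hx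
  have hmax : ∀ x ∈ lst, x ≤ mx := fun x hx => PySem.List.max?_isMax hmx x hx
  have hdm : ∀ x : Int,
      ((PySem.Dict.get? (lst.foldl (fun d ii => PySem.Dict.insert d ii 1)
        (PySem.Dict.empty : PySem.Dict Int Int)) x).isSome = true) ↔ x ∈ lst :=
    fun x => dict_get_mem lst x
  rw [← abs_cost lst hs t ht, List.getD_eq_getElem lst 0 ht]
  rw [seatsTot, hmn, hmx]
  simp only [Option.getD_some]
  set d := lst.foldl (fun d ii => PySem.Dict.insert d ii 1)
    (PySem.Dict.empty : PySem.Dict Int Int) with hd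
  have hpred : ∀ x : Int, ((PySem.Dict.get? d x).isSome) = decide (x ∈ lst) := by
    intro x
    have h := hdm x
    cases hb : (PySem.Dict.get? d x).isSome
    · rw [hb] at h
      simp only [Bool.false_eq_true, false_iff] at h
      simp [h]
    · rw [hb] at h
      simp [h.mp rfl]
  have hflt := filter_lt_take lst hs t ht
  have hfgt := filter_gt_drop lst hs t ht
  -- left loop
  have hleft : ((PySem.List.pyRange (lst[t] - 1) (mn - 1) (-1)).foldl (seatsStepDown d)
        (seatsWhileDown d (lst.length + 1) (lst[t] - 1), 0)).2
      = packDownAsc (lst.take t) (lst[t] - 1) := by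
    rw [foldl_filter_of_id (seatsStepDown d) (fun ii => (PySem.Dict.get? d ii).isSome) _ _
        (fun st x _ hx => by
          unfold seatsStepDown
          rw [if_neg]
          rintro ⟨h1, h2⟩
          have hx' : (PySem.Dict.get? d x).isSome = false := hx
          simp [h1] at hx')]
    rw [List.filter_congr (fun x _ => hpred x), filter_range_down lst lst[t] mn hs hmin, hflt]
    have hmemP : ∀ x : Int, x ≤ lst[t] - 1 →
        ((PySem.Dict.get? d x).isSome = true ↔ x ∈ (lst.take t).reverse) := by
      intro x hx
      rw [hdm x, List.mem_reverse, ← hflt, List.mem_filter]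
      constructor
      · intro h
        exact ⟨h, by simp; omega⟩
      · exact fun h => h.1
    rw [PySem.List.foldl_congr_mem _ (seatsStepDown d) pStepDown _
        (fun acc x hx => by
          have hx' : (PySem.Dict.get? d x).isSome = true := by
            rw [hdm x]
            exact List.mem_of_mem_take (List.mem_reverse.mp hx)
          simp [seatsStepDown, pStepDown, hx'])]
    rw [scan_down ((lst.take t).reverse) (lst[t] - 1) (lst.length + 1) d
        (List.pairwise_reverse.mpr (List.Pairwise.sublist (List.take_sublist t lst) hs))
        (fun p hp => by
          obtain ⟨i, hm, rfl⟩ := List.mem_take_iff_getElem.mp (List.mem_reverse.mp hp)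
          have := List.pairwise_iff_getElem.mp hs i t (by omega) ht (by omega)
          omega)
        (by simp)
        hmemP]
    rw [packDown_reverse]
  -- right loop
  have hright : ((PySem.List.pyRange (lst[t] + 1) (mx + 1) 1).foldl (seatsStepUp d)
        (seatsWhileUp d (lst.length + 1) (lst[t] + 1), 0)).2
      = packUpL (lst.drop (t + 1)) (lst[t] + 1) := by
    rw [foldl_filter_of_id (seatsStepUp d) (fun ii => (PySem.Dict.get? d ii).isSome) _ _
        (fun st x _ hx => by
          unfold seatsStepUp
          rw [if_neg]
          rintro ⟨h1, h2⟩
          have hx' : (PySem.Dict.get? d x).isSome = false := hx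
          simp [h1] at hx')]
    rw [List.filter_congr (fun x _ => hpred x), filter_range_up lst lst[t] mx hs hmax, hfgt]
    have hmemQ : ∀ x : Int, lst[t] + 1 ≤ x →
        ((PySem.Dict.get? d x).isSome = true ↔ x ∈ lst.drop (t + 1)) := by
      intro x hx
      rw [hdm x, ← hfgt, List.mem_filter]
      constructor
      · intro h
        exact ⟨h, by simp; omega⟩
      · exact fun h => h.1
    rw [PySem.List.foldl_congr_mem _ (seatsStepUp d) pStepUp _
        (fun acc x hx => by
          have hx' : (PySem.Dict.get? d x).isSome = true := by
            rw [hdm x]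
            exact (List.drop_sublist (t + 1) lst).mem hx
          simp [seatsStepUp, pStepUp, hx'])]
    rw [scan_up (lst.drop (t + 1)) (lst[t] + 1) (lst.length + 1) d
        (List.Pairwise.sublist (List.drop_sublist (t + 1) lst) hs)
        (fun p hp => by
          obtain ⟨i, hm, rfl⟩ := List.mem_iff_getElem.mp hp
          rw [List.getElem_drop]
          have := List.pairwise_iff_getElem.mp hs t (t + 1 + i) ht (by simp at hm; omega) (by omega)
          omega)
        (by simp)
        hmemQ]
  rw [hleft, hright]

theorem seats_main (A : String) : seats A = seats_alt A := by
  simp only [seats, seats_alt, pos_eq A]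
  set lst := (PySem.List.pyRange 0 (PySem.Str.len A) 1).filter
      (fun ii => PySem.Str.pyGet? A ii == some 'x') with hlst
  have hsrt : lst.Pairwise (· < ·) :=
    List.Pairwise.filter _ (PySem.List.pairwise_lt_pyRange_one 0 (PySem.Str.len A))
  by_cases h0 : lst = []
  · rw [if_pos (by rw [h0]; simp), if_pos h0]
  · have hlen : 0 < lst.length := List.length_pos_iff.mpr h0
    rw [if_neg (by omega), if_neg h0]
    rw [enum_map_eq lst]
    set j := lst.length / 2 with hj
    have hjk : j < lst.length := Nat.div_lt_self hlen (by omega)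
    have hdivA : PySem.Int.floordiv ((lst.length : Nat) : Int) 2 = ((j : Nat) : Int) := by
      rw [hj]; exact_mod_cast PySem.Int.floordiv_natCast lst.length 2
    have hmod : PySem.Int.mod ((lst.length : Nat) : Int) 2 = ((lst.length % 2 : Nat) : Int) := by
      exact_mod_cast PySem.Int.mod_natCast lst.length 2
    have hblen : ((List.range lst.length).map (fun i => lst.getD i 0 - (i : Int))).length
        = lst.length := by simp
    have hjk' : j < ((List.range lst.length).map (fun i => lst.getD i 0 - (i : Int))).length := by
      simpa using hjk
    have hmedB : ((List.range lst.length).map (fun i => lst.getD i 0 - (i : Int)))[j]'hjk'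
        = lst.getD j 0 - (j : Int) := by
      simp
    have hsumB : (((List.range lst.length).map (fun i => lst.getD i 0 - (i : Int))).map
          (fun x => |x - (lst.getD j 0 - (j : Int))|)).sum
        = ∑ i ∈ Finset.range lst.length,
            |lst.getD i 0 - (i : Int) - (lst.getD j 0 - (j : Int))| := by
      rw [sum_map_getD, hblen]
      refine Finset.sum_congr rfl (fun i hi => ?_)
      have hi' : i < lst.length := Finset.mem_range.mp hi
      rw [List.getD_eq_getElem _ _ (by simpa using hi')]
      simp
    rw [hblen, hdivA, PySem.List.pyGet?_natCast, PySem.List.pyGet?_natCast,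
      List.getElem?_eq_getElem hjk, List.getElem?_eq_getElem hjk']
    simp only [Option.getD_some]
    rw [hmedB, hsumB, ← List.getD_eq_getElem lst 0 hjk, tot_eq lst hsrt j hjk]
    by_cases hpar : lst.length % 2 = 0
    · rw [if_pos (by rw [hmod, hpar]; simp)]
      have hj1 : 1 ≤ j := by omega
      have hk2 : lst.length = 2 * j := by omega
      have hcast : ((j : Nat) : Int) - 1 = ((j - 1 : Nat) : Int) := by omega
      rw [hcast, PySem.List.pyGet?_natCast, List.getElem?_eq_getElem (by omega), Option.getD_some,
        ← List.getD_eq_getElem lst 0 (show j - 1 < lst.length by omega),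
        tot_eq lst hsrt (j - 1) (by omega),
        ← abs_pivot_eq lst hsrt j hk2 hj1, min_self]
    · rw [if_neg (by rw [hmod]; intro hc; exact hpar (by exact_mod_cast hc))]

-- ===== VERDICT (by name: the statement is the Claim_ definition above) =====
theorem seats_spec : Claim_equal_seats := by
  intro A _
  unfold Spec_seats
  exact seats_main A
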